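-- pv_equiv track=rewrite | github.com/BrunoBuchardo/Parcial-Python | PARCIAL/Funciones.py | jurado_mas_estricto
-- ===== SOURCE A (Python) =====
-- def jurado_mas_estricto(promedios):
--     """
--     Determina qué jurado(s) tienen el promedio más bajo.
--
--     Parámetros:
--         promedios (list[int]): Promedios por jurado.
--
--     Retorna:
--         list[int]: Lista con número(s) de jurado(s) más estricto(s), empezando desde 1.
--     """
--     minimo = promedios[0]
--     posiciones = [1]
--     for i in range(1, len(promedios)):
--         if promedios[i] < minimo:
--             minimo = promedios[i]
--             posiciones = [i + 1]
--         elif promedios[i] == minimo: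
--             posiciones = posiciones + [i + 1]
--     return posiciones
-- ===== SOURCE B (Python) =====
-- def jurado_mas_estricto(promedios):
--     minimo = min(promedios)
--     return [i + 1 for i, v in enumerate(promedios) if v == minimo]
-- ===== Notes on version B (the rewrite author's own statement) =====
-- stated objective: idiomatic
-- what changed: Replaces A's single fused scan that tracks a running minimum while rebuilding/extending the positions list by copying (posiciones = posiciones + [i+1]) with two plain passes: min() first, then a list comprehension over enumerate collecting the 1-based indices equal to it.
import Mathlib
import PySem

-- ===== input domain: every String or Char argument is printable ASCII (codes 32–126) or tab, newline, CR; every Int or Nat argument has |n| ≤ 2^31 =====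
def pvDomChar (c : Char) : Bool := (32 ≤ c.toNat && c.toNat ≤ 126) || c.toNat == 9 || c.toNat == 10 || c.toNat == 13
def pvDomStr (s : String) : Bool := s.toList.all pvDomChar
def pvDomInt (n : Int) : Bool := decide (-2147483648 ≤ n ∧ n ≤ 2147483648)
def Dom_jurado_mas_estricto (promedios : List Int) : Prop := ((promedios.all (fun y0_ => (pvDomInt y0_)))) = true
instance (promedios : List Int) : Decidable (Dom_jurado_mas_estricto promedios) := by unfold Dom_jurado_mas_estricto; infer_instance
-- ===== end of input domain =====

-- B replaces A's fused min-tracking scan by two passes (min, then a comprehension); idiomatic, same cost.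

-- ===== PORT A =====
def jurado_mas_estricto (promedios : List Int) : List Int :=
  let minimo := PySem.List.pyGetD promedios 0 0
  let st := (PySem.List.pyRange 1 (PySem.List.len promedios) 1).foldl
    (fun (st : Int × List Int) i =>
      let v := PySem.List.pyGetD promedios i 0
      if v < st.1 then (v, [i + 1])
      else if v = st.1 then (st.1, st.2 ++ [i + 1])
      else st)
    (minimo, [1])
  st.2

-- ===== PORT B =====
def jurado_mas_estricto_alt (promedios : List Int) : List Int :=
  let minimo := (PySem.List.min? promedios (fun v => v)).getD 0
  (PySem.List.enumerate promedios 0).filterMap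
    (fun p => if p.2 = minimo then some (p.1 + 1) else none)

-- ===== PRECONDITION & SPEC =====
-- Pre_ excludes only the empty list, on which A raises IndexError (and B raises ValueError).
def Pre_jurado_mas_estricto (promedios : List Int) : Prop := promedios ≠ []
instance (promedios : List Int) : Decidable (Pre_jurado_mas_estricto promedios) := by
  unfold Pre_jurado_mas_estricto; infer_instance

def pvWitness_jurado_mas_estricto : List Int := [3, 1, 4, 1]

def Spec_jurado_mas_estricto (promedios : List Int) (out : List Int) : Prop := out = jurado_mas_estricto_alt promedios
instance (promedios : List Int) (out : List Int) : Decidable (Spec_jurado_mas_estricto promedios out) := by unfold Spec_jurado_mas_estricto; infer_instance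

-- ===== CLAIM (what is proved, stated in full; the proofs are below) =====
def Claim_equal_jurado_mas_estricto : Prop := ∀ (promedios : List Int), Dom_jurado_mas_estricto promedios → Pre_jurado_mas_estricto promedios → Spec_jurado_mas_estricto promedios (jurado_mas_estricto promedios)

-- ===== LEMMAS AND PROOFS =====

theorem pvFoldlMin_le_init (l : List Int) (a : Int) : l.foldl min a ≤ a := by
  induction l generalizing a with
  | nil => simp
  | cons x t ih =>
      simp only [List.foldl_cons]
      exact le_trans (ih (min a x)) (min_le_left a x)

theorem pvFoldlMin_le_mem {l : List Int} {y : Int} (a : Int) (hy : y ∈ l) :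
    l.foldl min a ≤ y := by
  induction l generalizing a with
  | nil => cases hy
  | cons x t ih =>
      simp only [List.foldl_cons]
      rcases List.mem_cons.mp hy with h | h
      · subst h; exact le_trans (pvFoldlMin_le_init t (min a y)) (min_le_right a y)
      · exact ih _ h

-- invariant of A's loop over the first m+1 elements of x :: rest
theorem pvLoopInv (x : Int) (rest : List Int) (m : Nat) (hm : m ≤ rest.length) :
    (PySem.List.pyRange 1 ((m + 1 : Nat) : Int) 1).foldl
      (fun (st : Int × List Int) i =>
        let v := PySem.List.pyGetD (x :: rest) i 0
        if v < st.1 then (v, [i + 1])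
        else if v = st.1 then (st.1, st.2 ++ [i + 1])
        else st)
      (x, [1])
    = ((rest.take m).foldl min x,
       (PySem.List.enumerate (x :: rest.take m) 0).filterMap
         (fun p => if p.2 = (rest.take m).foldl min x then some (p.1 + 1) else none)) := by
  induction m with
  | zero =>
      simp [PySem.List.pyRange_one_eq_nil, PySem.List.enumerate]
  | succ m ih =>
      have hm' : m ≤ rest.length := Nat.le_of_succ_le hm
      have hlt : m < rest.length := hm
      have hsplit : PySem.List.pyRange 1 ((m + 1 + 1 : Nat) : Int) 1
          = PySem.List.pyRange 1 ((m + 1 : Nat) : Int) 1 ++ [((m + 1 : Nat) : Int)] := by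
        have h := PySem.List.pyRange_one_succ_right (a := 1) (b := ((m + 1 : Nat) : Int))
          (by exact_mod_cast Nat.le_add_left 1 m)
        have : ((m + 1 + 1 : Nat) : Int) = ((m + 1 : Nat) : Int) + 1 := by push_cast; ring
        rw [this, h]
      have hv : PySem.List.pyGetD (x :: rest) ((m + 1 : Nat) : Int) 0 = rest[m] := by
        rw [PySem.List.pyGetD_natCast]
        simp [List.getD, hlt]
      have htake : rest.take (m + 1) = rest.take m ++ [rest[m]] := by
        rw [List.take_add_one]
        simp [List.getElem?_eq_getElem hlt]
      have hminsucc : (rest.take (m + 1)).foldl min x = min ((rest.take m).foldl min x) rest[m] := by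
        rw [htake, List.foldl_append]; simp
      have henum : PySem.List.enumerate (x :: rest.take (m + 1)) 0
          = PySem.List.enumerate (x :: rest.take m) 0 ++ [(((m + 1 : Nat) : Int), rest[m])] := by
        have : (x :: rest.take (m + 1)) = (x :: rest.take m) ++ [rest[m]] := by
          rw [htake]; simp
        rw [this, PySem.List.enumerate_append]
        have hlen : (x :: rest.take m).length = m + 1 := by simp [List.length_take, Nat.min_eq_left hm']
        simp [hlen, PySem.List.enumerate]
      set M := (rest.take m).foldl min x with hM
      set v := rest[m] with hvdef
      have hmem_le : ∀ p ∈ PySem.List.enumerate (x :: rest.take m) 0, M ≤ p.2 := by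
        intro p hp
        rcases (PySem.List.mem_enumerate_iff _ _ _).mp hp with ⟨k, hk, rfl⟩
        have hmem : (x :: rest.take m)[k] ∈ x :: rest.take m := List.getElem_mem hk
        rcases List.mem_cons.mp hmem with h | h
        · rw [h]; exact pvFoldlMin_le_init _ _
        · exact pvFoldlMin_le_mem x h
      rw [hsplit, List.foldl_append, ih hm']
      simp only [List.foldl_cons, List.foldl_nil]
      by_cases h1 : v < M
      · -- new strict minimum
        have hminval : (rest.take (m + 1)).foldl min x = v := by
          rw [hminsucc]; exact min_eq_right h1.le
        have hnil : (PySem.List.enumerate (x :: rest.take m) 0).filterMap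
            (fun p => if p.2 = v then some (p.1 + 1) else none) = [] := by
          rw [List.filterMap_eq_nil_iff]
          intro p hp
          have hne : p.2 ≠ v := by
            intro he; exact absurd h1 (not_lt.mpr (he ▸ hmem_le p hp))
          simp [hne]
        rw [hminval, henum, List.filterMap_append, hnil, hv, if_pos h1]
        simp
      · by_cases h2 : v = M
        · -- tie with current minimum
          have hminval : (rest.take (m + 1)).foldl min x = M := by
            rw [hminsucc, h2]; simp
          rw [hminval, henum, List.filterMap_append, hv, if_neg h1, if_pos h2]
          simp [h2]
        · -- strictly larger
          have h3 : M < v := lt_of_le_of_ne (not_lt.mp h1) (fun he => h2 he.symm)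
          have hminval : (rest.take (m + 1)).foldl min x = M := by
            rw [hminsucc]; exact min_eq_left h3.le
          rw [hminval, henum, List.filterMap_append, hv, if_neg h1, if_neg h2]
          simp [h2]

-- ===== VERDICT (by name: the statement is the Claim_ definition above) =====
theorem jurado_mas_estricto_spec : Claim_equal_jurado_mas_estricto := by
  intro promedios _ hpre
  unfold Spec_jurado_mas_estricto
  match promedios, hpre with
  | x :: rest, _ =>
    have h := pvLoopInv x rest rest.length le_rfl
    unfold jurado_mas_estricto jurado_mas_estricto_alt
    simp only [PySem.List.len_eq, List.length_cons, PySem.List.pyGetD_zero_cons,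
      List.take_length] at h ⊢
    rw [h]
    rw [PySem.List.min?_id_cons]
    rfl
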